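-- pv_equiv track=rewrite | github.com/wanglalalalala/CS5260 | frontend/services/real_agent.py | _escape_dollars
-- ===== SOURCE A (Python) =====
-- def _escape_dollars(text: str) -> str:
--     """Escape unescaped `$` so Streamlit's Markdown does not render price
--     ranges as LaTeX math."""
--     out = []
--     i = 0
--     while i < len(text):
--         ch = text[i]
--         if ch == "$" and (i == 0 or text[i - 1] != "\\"):
--             out.append("\\$")
--         else:
--             out.append(ch)
--         i += 1
--     return "".join(out)
-- ===== SOURCE B (Python) =====
-- def _escape_dollars(text: str) -> str:
--     """Escape unescaped `$` so Streamlit's Markdown does not render price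
--     ranges as LaTeX math."""
--     parts = text.split("$")
--     res = parts[0]
--     for part in parts[1:]:
--         res += ("$" if res.endswith("\\") else "\\$") + part
--     return res
-- ===== Notes on version B (the rewrite author's own statement) =====
-- stated objective: faster
-- what changed: Replaces A's per-character index loop (with its previous-character lookups) by splitting the text on the dollar sign and rejoining the segments, choosing the escaped or plain separator at each boundary according to whether the accumulated result ends in a backslash.
import Mathlib
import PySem

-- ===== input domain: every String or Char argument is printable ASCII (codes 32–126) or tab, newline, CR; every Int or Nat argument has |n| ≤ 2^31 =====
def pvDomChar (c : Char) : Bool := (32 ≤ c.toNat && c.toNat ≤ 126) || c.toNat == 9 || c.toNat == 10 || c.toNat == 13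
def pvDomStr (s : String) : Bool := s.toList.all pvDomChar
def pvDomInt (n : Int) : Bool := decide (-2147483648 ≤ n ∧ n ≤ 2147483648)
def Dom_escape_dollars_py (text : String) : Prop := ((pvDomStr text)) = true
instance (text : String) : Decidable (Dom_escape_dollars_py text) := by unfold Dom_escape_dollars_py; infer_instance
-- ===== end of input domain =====

-- B replaces A's per-character while loop by splitting the text on '$' and rejoining the
-- segments, choosing '$' or '\$' at each boundary from whether the text so far ends in a
-- backslash (idiomatic, segment-based); return values proved equal on all of Dom.

-- ===== PORT A =====
-- A's while loop: index i, appends "\$" or the character to `out`, then "".join(out).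
def escapeDollarsLoopA (cs : List Char) (i : Nat) (out : List (List Char)) : List (List Char) :=
  if _h : i < cs.length then
    let ch := cs.getD i ' '
    let out' := if ch = '$' ∧ (i = 0 ∨ cs.getD (i - 1) ' ' ≠ '\\')
                then out ++ [['\\', '$']] else out ++ [[ch]]
    escapeDollarsLoopA cs (i + 1) out'
  else out
termination_by cs.length - i

def escape_dollars_py (text : String) : String :=
  String.mk (escapeDollarsLoopA text.toList 0 []).flatten

-- ===== PORT B =====
-- B's for loop over parts[1:]: res += ('$' if res.endswith('\\') else '\\$') + part
def escJoinB (res : List Char) (parts : List (List Char)) : List Char :=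
  match parts with
  | [] => res
  | p :: rest =>
      escJoinB (res ++ (if PySem.Chars.endswith res ['\\'] then ['$'] else ['\\', '$']) ++ p) rest

def escape_dollars_py_alt (text : String) : String :=
  -- parts = text.split('$') (always nonempty); res = parts[0]; loop over parts[1:]
  String.mk (escJoinB ((text.toList.splitOn '$').headD []) (text.toList.splitOn '$').tail)

-- ===== PRECONDITION & SPEC =====
def Spec_escape_dollars_py (text : String) (out : String) : Prop := out = escape_dollars_py_alt text
instance (text : String) (out : String) : Decidable (Spec_escape_dollars_py text out) := by unfold Spec_escape_dollars_py; infer_instance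

-- ===== CLAIM (what is proved, stated in full; the proofs are below) =====
def Claim_equal_escape_dollars_py : Prop := ∀ (text : String), Dom_escape_dollars_py text → Spec_escape_dollars_py text (escape_dollars_py text)

-- ===== LEMMAS AND PROOFS =====

-- common intermediate form: process the suffix, carrying the previous character
def escGo (p : Char) (cs : List Char) : List Char :=
  match cs with
  | [] => []
  | c :: rest => (if c = '$' ∧ p ≠ '\\' then ['\\', '$'] else [c]) ++ escGo c rest

theorem escA_eq_go (cs : List Char) (i : Nat) (out : List (List Char)) (p : Char)
    (hp : (i = 0 ∧ p ≠ '\\') ∨ (0 < i ∧ p = cs.getD (i - 1) ' ')) :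
    (escapeDollarsLoopA cs i out).flatten = out.flatten ++ escGo p (cs.drop i) := by
  by_cases h : i < cs.length
  · rw [escapeDollarsLoopA]
    simp only [h, dif_pos]
    have hdrop : cs.drop i = cs[i] :: cs.drop (i + 1) :=
      List.drop_eq_getElem_cons h
    have hget : cs.getD i ' ' = cs[i] := by
      simp [List.getD, List.getElem?_eq_getElem h]
    have hcond : (cs[i] = '$' ∧ (i = 0 ∨ cs.getD (i - 1) ' ' ≠ '\\'))
        ↔ (cs[i] = '$' ∧ p ≠ '\\') := by
      constructor
      · rintro ⟨h1, h2⟩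
        refine ⟨h1, ?_⟩
        rcases hp with ⟨hi0, hp⟩ | ⟨hi, hpe⟩
        · exact hp
        · rcases h2 with h2 | h2
          · omega
          · rw [hpe]; exact h2
      · rintro ⟨h1, h2⟩
        refine ⟨h1, ?_⟩
        rcases hp with ⟨hi0, hp⟩ | ⟨hi, hpe⟩
        · exact Or.inl hi0
        · exact Or.inr (hpe ▸ h2)
    have hrec := escA_eq_go cs (i + 1)
      (if cs.getD i ' ' = '$' ∧ (i = 0 ∨ cs.getD (i - 1) ' ' ≠ '\\')
       then out ++ [['\\', '$']] else out ++ [[cs.getD i ' ']]) cs[i]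
      (Or.inr ⟨Nat.succ_pos i, by simp [List.getD, List.getElem?_eq_getElem h]⟩)
    rw [hget] at hrec ⊢
    rw [hrec, hdrop, escGo]
    by_cases hc : cs[i] = '$' ∧ p ≠ '\\'
    · rw [if_pos (hcond.mpr hc), if_pos hc]; simp
    · rw [if_neg (fun hx => hc (hcond.mp hx)), if_neg hc]; simp
  · rw [escapeDollarsLoopA]
    simp only [h, dif_neg, not_false_iff]
    rw [List.drop_of_length_le (Nat.le_of_not_lt h)]
    simp [escGo]
termination_by cs.length - i

theorem endswith_back (res : List Char) :
    PySem.Chars.endswith res ['\\'] = true ↔ res.getLast? = some '\\' := by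
  rw [PySem.Chars.endswith_iff]
  constructor
  · rintro ⟨t, rfl⟩
    simp
  · intro h
    rcases res.eq_nil_or_concat with rfl | ⟨t, c, rfl⟩
    · simp at h
    · simp at h
      exact ⟨t, by simp [h]⟩

theorem splitOn_ne_nil (cs : List Char) : cs.splitOn '$' ≠ [] := by
  unfold List.splitOn
  exact List.splitOnP_ne_nil _ cs

theorem escB_eq_go (cs : List Char) (p : Char) (res : List Char)
    (hp : res.getLast? = some '\\' ↔ p = '\\') :
    escJoinB (res ++ (cs.splitOn '$').headD []) (cs.splitOn '$').tail = res ++ escGo p cs := by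
  induction cs generalizing p res with
  | nil => simp [List.splitOn_nil, escJoinB, escGo]
  | cons c rest ih =>
      rcases eq_or_ne c '$' with rfl | hc
      · have hsp : ('$' :: rest).splitOn '$' = [] :: rest.splitOn '$' := by
          simp [List.splitOn, List.splitOnP_cons]
        obtain ⟨h, t, hht⟩ : ∃ h t, rest.splitOn '$' = h :: t := by
          rcases hx : rest.splitOn '$' with _ | ⟨h, t⟩
          · exact absurd hx (splitOn_ne_nil rest)
          · exact ⟨h, t, rfl⟩
        rw [hsp]
        simp only [List.headD, List.tail, hht]
        rw [escJoinB]
        have hsep : (if PySem.Chars.endswith (res ++ []) ['\\'] then ['$'] else ['\\', '$'])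
            = if p = '\\' then ['$'] else ['\\', '$'] := by
          by_cases hpb : p = '\\'
          · rw [if_pos hpb, if_pos]
            simp only [List.append_nil]
            exact (endswith_back res).mpr (hp.mpr hpb)
          · rw [if_neg hpb, if_neg]
            simp only [List.append_nil]
            intro hew
            exact hpb (hp.mp ((endswith_back res).mp hew))
        rw [hsep]
        set sep := if p = '\\' then ['$'] else ['\\', '$'] with hsepdef
        have hlast : (res ++ [] ++ sep).getLast? = some '$' := by
          by_cases hpb : p = '\\' <;> simp [hsepdef, hpb]
        have := ih '$' (res ++ [] ++ sep) (by rw [hlast]; simp)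
        rw [hht] at this
        simp only [List.headD, List.tail] at this
        rw [this, escGo]
        by_cases hpb : p = '\\' <;> simp [hsepdef, hpb]
      · have hsp : (c :: rest).splitOn '$' = (rest.splitOn '$').modifyHead (c :: ·) := by
          simp [List.splitOn, List.splitOnP_cons, hc]
        obtain ⟨h, t, hht⟩ : ∃ h t, rest.splitOn '$' = h :: t := by
          rcases hx : rest.splitOn '$' with _ | ⟨h, t⟩
          · exact absurd hx (splitOn_ne_nil rest)
          · exact ⟨h, t, rfl⟩
        rw [hsp, hht]
        simp only [List.modifyHead, List.headD, List.tail]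
        have := ih c (res ++ [c]) (by simp)
        rw [hht] at this
        simp only [List.headD, List.tail] at this
        have goal1 : res ++ c :: h = res ++ [c] ++ h := by simp
        rw [goal1, this, escGo]
        have : ¬ (c = '$' ∧ p ≠ '\\') := fun hx => hc hx.1
        rw [if_neg this]
        simp

-- ===== VERDICT (by name: the statement is the Claim_ definition above) =====
theorem escape_dollars_py_spec : Claim_equal_escape_dollars_py := by
  intro text _
  unfold Spec_escape_dollars_py escape_dollars_py escape_dollars_py_alt
  rw [escA_eq_go text.toList 0 [] (Char.ofNat 0) (Or.inl ⟨rfl, by decide⟩)]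
  have := escB_eq_go text.toList (Char.ofNat 0) [] (by simp)
  simp only [List.nil_append] at this
  simp only [List.flatten_nil, List.nil_append, List.drop_zero]
  rw [← this]
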